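-- pv_equiv track=rewrite | github.com/wanghan2789/CPP_learning | algorithm/Practice/最长递增子序列.py | dp_n2
-- ===== SOURCE A (Python) =====
-- def dp_n2(A, n):
--     #不对的，比如1 6 2 3 4 7 5 6 不能正确返回 1 2 3 4 5 6 = 6
--     if not A:
--         return
--     if n == 1:
--         return A[0]
--     maxlen = 0
--     for i in range(n):
--         Aini = A[i]
--         lentmp = 0
--         for j in range(i,n):
--             if i == j:
--                 lentmp += 1
--                 Aini = A[j]
--                 continue
--             if Aini < A[j]:
--                 Aini = A[j]
--                 lentmp += 1
--
--         maxlen = max(maxlen,lentmp)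
--     return maxlen
-- ===== SOURCE B (Python) =====
-- def dp_n2(A, n):
--     # O(n) monotonic-stack rewrite: the greedy left-to-right-maxima chain starting at i is
--     # i followed by the chain of i's next strictly greater element, so one right-to-left
--     # pass maintaining that chain as a stack gives every start's count.
--     if not A:
--         return
--     if n == 1:
--         return A[0]
--     stack = []   # values of the greedy chain starting at current i, top at end
--     best = 0
--     for i in range(n - 1, -1, -1):
--         x = A[i]
--         while stack and stack[-1] <= x:
--             stack.pop()
--         stack.append(x)
--         if len(stack) > best:
--             best = len(stack)
--     return best
-- ===== Notes on version B (the rewrite author's own statement) =====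
-- stated objective: faster
-- what changed: Replaces A's restart-the-greedy-scan-at-every-index double loop by a single right-to-left pass that maintains the greedy increasing chain from the current index as a monotonic stack (the chain from i is i followed by the chain of i's next strictly greater element), tracking the maximum stack size.
import Mathlib
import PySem

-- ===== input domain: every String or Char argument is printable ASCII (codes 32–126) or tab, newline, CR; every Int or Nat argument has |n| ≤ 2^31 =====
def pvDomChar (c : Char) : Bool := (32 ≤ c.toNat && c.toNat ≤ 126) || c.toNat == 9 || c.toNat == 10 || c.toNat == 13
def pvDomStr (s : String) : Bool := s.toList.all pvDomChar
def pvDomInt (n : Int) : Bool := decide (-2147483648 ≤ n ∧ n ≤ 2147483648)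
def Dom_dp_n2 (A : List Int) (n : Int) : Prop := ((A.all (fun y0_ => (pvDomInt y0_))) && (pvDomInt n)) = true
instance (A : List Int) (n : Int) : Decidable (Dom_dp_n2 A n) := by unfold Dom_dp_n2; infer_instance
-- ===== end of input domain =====

-- B replaces A's quadratic restart-at-every-index scan by one right-to-left monotonic-stack pass
-- (the greedy chain from i is i followed by the chain of i's next strictly greater element); O(n).

-- ===== PORT A =====
-- literal port of A: for each i, re-walk j = i..n-1 greedily counting strict increases, keep the max
def dp_n2 (A : List Int) (n : Int) : Option Int :=
  if A = [] then none
  else if n = 1 then some (PySem.List.pyGetD A 0 0)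
  else
    some ((PySem.List.pyRange 0 n 1).foldl (fun maxlen i =>
      let st := (PySem.List.pyRange i n 1).foldl (fun (st : Int × Int) j =>
        if i = j then (PySem.List.pyGetD A j 0, st.2 + 1)
        else if st.1 < PySem.List.pyGetD A j 0 then (PySem.List.pyGetD A j 0, st.2 + 1)
        else st) (PySem.List.pyGetD A i 0, 0)
      max maxlen st.2) 0)

-- ===== PORT B =====
-- the while-pop loop of Source B: drop stack entries ≤ x (stack top at the head)
def popLE (x : Int) : List Int → List Int
  | [] => []
  | h :: t => if h ≤ x then popLE x t else h :: t

-- literal port of B: one pass i = n-1 .. 0 maintaining the greedy chain from i as a stack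
def dp_n2_alt (A : List Int) (n : Int) : Option Int :=
  if A = [] then none
  else if n = 1 then some (PySem.List.pyGetD A 0 0)
  else
    some (((PySem.List.pyRange (n - 1) (-1) (-1)).foldl (fun (st : List Int × Int) i =>
      let x := PySem.List.pyGetD A i 0
      let stack := x :: popLE x st.1
      (stack, if st.2 < (stack.length : Int) then (stack.length : Int) else st.2)) ([], 0)).2)

-- ===== PRECONDITION & SPEC =====
-- Pre_ excludes only the inputs where Python A raises IndexError: a nonempty A with n > len(A).
def Pre_dp_n2 (A : List Int) (n : Int) : Prop := A = [] ∨ n ≤ (A.length : Int)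
instance (A : List Int) (n : Int) : Decidable (Pre_dp_n2 A n) := by unfold Pre_dp_n2; infer_instance
def pvWitness_dp_n2 : List Int × Int := ([1, 6, 2, 3, 4, 7, 5, 6], 8)
def Spec_dp_n2 (A : List Int) (n : Int) (out : Option Int) : Prop := out = dp_n2_alt A n
instance (A : List Int) (n : Int) (out : Option Int) : Decidable (Spec_dp_n2 A n out) := by unfold Spec_dp_n2; infer_instance

-- ===== CLAIM (what is proved, stated in full; the proofs are below) =====
def Claim_equal_dp_n2 : Prop := ∀ (A : List Int) (n : Int), Dom_dp_n2 A n → Pre_dp_n2 A n → Spec_dp_n2 A n (dp_n2 A n)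

-- ===== LEMMAS AND PROOFS =====

-- the greedy left-to-right-maxima count of A's inner loop, on the list of values after the start
def greedy (cur : Int) : List Int → Int
  | [] => 0
  | y :: ys => if cur < y then 1 + greedy y ys else greedy cur ys

-- the stack B holds after processing a value list right-to-left (top at the head)
def stk : List Int → List Int
  | [] => []
  | y :: ys => y :: popLE y (stk ys)

-- A's inner-loop step on values
def gstep (st : Int × Int) (y : Int) : Int × Int := if st.1 < y then (y, st.2 + 1) else st

theorem popLE_popLE (x y : Int) (h : y ≤ x) : ∀ l : List Int, popLE x (popLE y l) = popLE x l := by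
  intro l
  induction l with
  | nil => rfl
  | cons a t ih =>
    by_cases ha : a ≤ y
    · simp [popLE, ha, le_trans ha h, ih]
    · simp [popLE, ha]

theorem greedy_stk (vs : List Int) : ∀ cur : Int, greedy cur vs = ((popLE cur (stk vs)).length : Int) := by
  induction vs with
  | nil => intro cur; rfl
  | cons y ys ih =>
    intro cur
    by_cases h : cur < y
    · simp [greedy, stk, popLE, h, not_le.mpr h, ih y]; omega
    · have hy : y ≤ cur := not_lt.mp h
      simp [greedy, stk, popLE, h, hy, popLE_popLE cur y hy, ih cur]

theorem stk_len (x : Int) (vs : List Int) : ((stk (x :: vs)).length : Int) = 1 + greedy x vs := by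
  simp [stk, greedy_stk vs x]; omega

theorem foldl_gstep (ys : List Int) : ∀ cur c : Int, (ys.foldl gstep (cur, c)).2 = c + greedy cur ys := by
  induction ys with
  | nil => intro cur c; simp [greedy]
  | cons y t ih =>
    intro cur c
    by_cases h : cur < y
    · simp [List.foldl_cons, gstep, greedy, h, ih y (c + 1)]; ring
    · simp [List.foldl_cons, gstep, greedy, h, ih cur c]

-- A's inner loop starting at i computes the stack length at i
theorem innerA_eq (v : Int → Int) (n i : Int) (hi : i < n) :
    ((PySem.List.pyRange i n 1).foldl (fun (st : Int × Int) j =>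
        if i = j then (v j, st.2 + 1)
        else if st.1 < v j then (v j, st.2 + 1)
        else st) (v i, 0)).2
    = ((stk ((PySem.List.pyRange i n 1).map v)).length : Int) := by
  rw [PySem.List.pyRange_one_cons hi]
  have hcongr : ∀ (init : Int × Int),
      (PySem.List.pyRange (i + 1) n 1).foldl (fun (st : Int × Int) j =>
        if i = j then (v j, st.2 + 1)
        else if st.1 < v j then (v j, st.2 + 1)
        else st) init
      = (PySem.List.pyRange (i + 1) n 1).foldl (fun (st : Int × Int) j => gstep st (v j)) init := by
    intro init
    apply PySem.List.foldl_congr_mem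
    intro st j hj
    have : i + 1 ≤ j := (PySem.List.mem_pyRange_one.mp hj).1
    have hne : ¬ i = j := by omega
    simp [hne, gstep]
  simp only [List.foldl_cons, if_true]
  rw [hcongr]
  have : (PySem.List.pyRange (i + 1) n 1).foldl (fun (st : Int × Int) j => gstep st (v j)) (v i, 0 + 1)
      = ((PySem.List.pyRange (i + 1) n 1).map v).foldl gstep (v i, 0 + 1) := by
    rw [List.foldl_map]
  rw [this, foldl_gstep]
  simp [List.map_cons, stk_len]

-- pulling max through a foldr over max
theorem foldr_max_init (g : Int → Int) (l : List Int) : ∀ a b : Int,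
    l.foldr (fun i r => max (g i) r) (max a b) = max b (l.foldr (fun i r => max (g i) r) a) := by
  induction l with
  | nil => intro a b; simp [max_comm]
  | cons x t ih => intro a b; simp [List.foldr_cons, ih a b, max_left_comm]

theorem foldl_max_eq_foldr (g : Int → Int) (l : List Int) : ∀ a : Int,
    l.foldl (fun m i => max m (g i)) a = l.foldr (fun i r => max (g i) r) a := by
  induction l with
  | nil => intro a; rfl
  | cons x t ih =>
    intro a
    simp only [List.foldl_cons, List.foldr_cons, ih (max a (g x))]
    rw [foldr_max_init g t a (g x)]

-- B's right-to-left pass computes (stack of the suffix, running max of all suffix stack lengths)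
theorem bfold_eq (v : Int → Int) (n : Int) : ∀ (fuel : Nat) (k : Int), (n - k).toNat ≤ fuel →
    (PySem.List.pyRange k n 1).foldr (fun i (st : List Int × Int) =>
        let x := v i
        let stack := x :: popLE x st.1
        (stack, if st.2 < (stack.length : Int) then (stack.length : Int) else st.2)) ([], 0)
    = (stk ((PySem.List.pyRange k n 1).map v),
       (PySem.List.pyRange k n 1).foldr
         (fun i r => max ((stk ((PySem.List.pyRange i n 1).map v)).length : Int) r) 0) := by
  intro fuel
  induction fuel with
  | zero =>
    intro k hk
    have hnk : n ≤ k := by omega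
    simp [PySem.List.pyRange_one_eq_nil hnk, stk]
  | succ m ih =>
    intro k hk
    by_cases hkn : k < n
    · have hrec := ih (k + 1) (by omega)
      rw [PySem.List.pyRange_one_cons hkn]
      simp only [List.foldr_cons, hrec, List.map_cons, Prod.mk.injEq]
      constructor
      · simp [stk]
      · have hlen : ((stk ((PySem.List.pyRange k n 1).map v)).length : Int)
            = ((v k :: popLE (v k) (stk ((PySem.List.pyRange (k+1) n 1).map v))).length : Int) := by
          rw [PySem.List.pyRange_one_cons hkn]; simp [stk]
        set L := ((v k :: popLE (v k) (stk ((PySem.List.pyRange (k+1) n 1).map v))).length : Int) with hL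
        set M := (PySem.List.pyRange (k+1) n 1).foldr
          (fun i r => max ((stk ((PySem.List.pyRange i n 1).map v)).length : Int) r) 0 with hM
        rw [hlen]
        by_cases hc : M < L
        · simp [hc, max_eq_left (le_of_lt hc)]
        · simp [hc, max_eq_right (not_lt.mp hc)]
    · have hnk : n ≤ k := by omega
      simp [PySem.List.pyRange_one_eq_nil hnk, stk]

-- the main case: A's double loop equals B's single pass, for any value function
theorem main_eq (v : Int → Int) (n : Int) :
    (PySem.List.pyRange 0 n 1).foldl (fun maxlen i =>
      let st := (PySem.List.pyRange i n 1).foldl (fun (st : Int × Int) j =>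
        if i = j then (v j, st.2 + 1)
        else if st.1 < v j then (v j, st.2 + 1)
        else st) (v i, 0)
      max maxlen st.2) 0
    = ((PySem.List.pyRange (n - 1) (-1) (-1)).foldl (fun (st : List Int × Int) i =>
        let x := v i
        let stack := x :: popLE x st.1
        (stack, if st.2 < (stack.length : Int) then (stack.length : Int) else st.2)) ([], 0)).2 := by
  have hrev : PySem.List.pyRange (n - 1) (-1) (-1) = (PySem.List.pyRange 0 n 1).reverse := by
    rw [PySem.List.pyRange_neg_one_eq_reverse]; norm_num
  rw [hrev, List.foldl_reverse]
  have hb := bfold_eq v n (n - 0).toNat 0 (le_refl _)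
  rw [hb]
  have hA : (PySem.List.pyRange 0 n 1).foldl (fun maxlen i =>
      let st := (PySem.List.pyRange i n 1).foldl (fun (st : Int × Int) j =>
        if i = j then (v j, st.2 + 1)
        else if st.1 < v j then (v j, st.2 + 1)
        else st) (v i, 0)
      max maxlen st.2) 0
      = (PySem.List.pyRange 0 n 1).foldl
          (fun maxlen i => max maxlen ((stk ((PySem.List.pyRange i n 1).map v)).length : Int)) 0 := by
    apply PySem.List.foldl_congr_mem
    intro m i hi
    have hi' : i < n := (PySem.List.mem_pyRange_one.mp hi).2
    simp only [innerA_eq v n i hi']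
  rw [hA, foldl_max_eq_foldr]

-- ===== VERDICT (by name: the statement is the Claim_ definition above) =====
theorem dp_n2_spec : Claim_equal_dp_n2 := by
  intro A n _ _
  unfold Spec_dp_n2 dp_n2 dp_n2_alt
  by_cases hA : A = []
  · simp [hA]
  · by_cases hn : n = 1
    · simp [hA, hn]
    · simp only [hA, hn, if_false]
      exact congrArg some (main_eq (fun j => PySem.List.pyGetD A j 0) n)
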